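-- pv_equiv track=rewrite | github.com/ckswjd99-lab/AppCorr | offload/policies/scheduling/dynamic_group_trigger.py | _hint_ready_prefix_end
-- ===== SOURCE A (Python) =====
-- def _hint_ready_prefix_end(
--     request_id: int | None,
--     total_layers: int,
--     hint_ready_layers_by_request: dict[int, set[int]] | None,
-- ) -> int:
--     if request_id is None:
--         return 0
--     ready_layers = (hint_ready_layers_by_request or {}).get(int(request_id), set())
--     prefix_end = 0
--     while prefix_end < total_layers and prefix_end in ready_layers:
--         prefix_end += 1
--     return prefix_end
-- ===== SOURCE B (Python) =====
-- def _hint_ready_prefix_end(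
--     request_id,
--     total_layers,
--     hint_ready_layers_by_request,
-- ):
--     if request_id is None:
--         return 0
--     ready_layers = (hint_ready_layers_by_request or {}).get(int(request_id), set())
--     first_gap = 0
--     for x in sorted(ready_layers):
--         if x > first_gap:
--             break
--         if x == first_gap:
--             first_gap += 1
--     return min(first_gap, max(0, total_layers))
-- ===== Notes on version B (the rewrite author's own statement) =====
-- stated objective: alternative
-- what changed: Replaces A's incremental while-scan (repeated membership tests advancing prefix_end up to total_layers) by sort-then-scan over the ready set: sort the ready layers, find the first gap from 0 in one pass, and clamp with min(first_gap, max(0, total_layers)).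
import Mathlib
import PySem

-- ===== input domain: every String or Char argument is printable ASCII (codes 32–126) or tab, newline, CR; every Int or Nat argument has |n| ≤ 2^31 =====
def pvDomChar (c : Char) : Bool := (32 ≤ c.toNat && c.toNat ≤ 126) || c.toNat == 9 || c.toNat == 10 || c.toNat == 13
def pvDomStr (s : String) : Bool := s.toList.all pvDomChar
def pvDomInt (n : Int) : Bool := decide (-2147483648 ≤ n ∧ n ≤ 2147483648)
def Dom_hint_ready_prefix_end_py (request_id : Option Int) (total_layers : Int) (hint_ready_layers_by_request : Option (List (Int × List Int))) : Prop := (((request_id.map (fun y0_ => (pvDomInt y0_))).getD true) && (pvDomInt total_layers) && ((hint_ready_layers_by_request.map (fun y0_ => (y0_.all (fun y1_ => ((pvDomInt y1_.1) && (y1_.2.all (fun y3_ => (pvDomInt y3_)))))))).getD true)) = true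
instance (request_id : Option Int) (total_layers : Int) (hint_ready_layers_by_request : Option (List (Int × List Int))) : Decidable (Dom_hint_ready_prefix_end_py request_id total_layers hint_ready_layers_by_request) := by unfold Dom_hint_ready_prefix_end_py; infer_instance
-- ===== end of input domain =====

-- ===== PORT A =====
def pvLoopA (ready : List Int) (tl : Int) (p : Int) : Int :=
  if h : p < tl ∧ ready.contains p = true then pvLoopA ready tl (p + 1) else p
termination_by (tl - p).toNat
decreasing_by omega

-- while-scan: advance prefix_end while it is below total_layers and ready
def hint_ready_prefix_end_py (request_id : Option Int) (total_layers : Int) (hint_ready_layers_by_request : Option (List (Int × List Int))) : Int :=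
  match request_id with
  | none => 0
  | some r =>
    let ready := (PySem.Dict.ofList (hint_ready_layers_by_request.getD [])).getD r []
    pvLoopA ready total_layers 0

-- ===== PORT B =====
def pvFirstGap : List Int → Int → Int
  | [], g => g
  | x :: xs, g => if x > g then g else if x == g then pvFirstGap xs (g + 1) else pvFirstGap xs g

-- B: sort the ready layers (order-independent over the set), scan once for the
-- first gap from 0, clamp with min(first_gap, max(0, total_layers))
def hint_ready_prefix_end_py_alt (request_id : Option Int) (total_layers : Int) (hint_ready_layers_by_request : Option (List (Int × List Int))) : Int :=
  match request_id with
  | none => 0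
  | some r =>
    let ready := (PySem.Dict.ofList (hint_ready_layers_by_request.getD [])).getD r []
    min (pvFirstGap (PySem.List.sorted ready (fun x => x) false) 0) (max 0 total_layers)

-- ===== PRECONDITION & SPEC =====
def Spec_hint_ready_prefix_end_py (request_id : Option Int) (total_layers : Int) (hint_ready_layers_by_request : Option (List (Int × List Int))) (out : Int) : Prop := out = hint_ready_prefix_end_py_alt request_id total_layers hint_ready_layers_by_request
instance (request_id : Option Int) (total_layers : Int) (hint_ready_layers_by_request : Option (List (Int × List Int))) (out : Int) : Decidable (Spec_hint_ready_prefix_end_py request_id total_layers hint_ready_layers_by_request out) := by unfold Spec_hint_ready_prefix_end_py; infer_instance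

-- ===== CLAIM (what is proved, stated in full; the proofs are below) =====
def Claim_equal_hint_ready_prefix_end_py : Prop := ∀ (request_id : Option Int) (total_layers : Int) (hint_ready_layers_by_request : Option (List (Int × List Int))), Dom_hint_ready_prefix_end_py request_id total_layers hint_ready_layers_by_request → Spec_hint_ready_prefix_end_py request_id total_layers hint_ready_layers_by_request (hint_ready_prefix_end_py request_id total_layers hint_ready_layers_by_request)

-- ===== LEMMAS AND PROOFS =====


lemma pvLoopA_char (ready : List Int) (tl p : Int) :
    p ≤ pvLoopA ready tl p ∧ pvLoopA ready tl p ≤ max p tl ∧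
    (pvLoopA ready tl p < tl → ready.contains (pvLoopA ready tl p) = false) ∧
    (∀ i : Int, p ≤ i → i < pvLoopA ready tl p → ready.contains i = true) := by
  induction p using pvLoopA.induct (ready := ready) (tl := tl) with
  | case1 p h ih =>
    rw [pvLoopA, dif_pos h]
    obtain ⟨ih1, ih2, ih3, ih4⟩ := ih
    refine ⟨by omega, by omega, ih3, ?_⟩
    intro i hpi hir
    by_cases hi : i = p
    · subst hi; exact h.2
    · exact ih4 i (by omega) hir
  | case2 p h =>
    rw [pvLoopA, dif_neg h]
    refine ⟨le_refl _, le_max_left _ _, ?_, by omega⟩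
    intro hlt
    by_contra hc
    exact h ⟨hlt, by simpa using hc⟩

lemma pvFirstGap_char (L : List Int) (hL : L.Pairwise (· ≤ ·)) (g : Int) :
    g ≤ pvFirstGap L g ∧ pvFirstGap L g ∉ L ∧
    (∀ i : Int, g ≤ i → i < pvFirstGap L g → i ∈ L) := by
  induction L generalizing g with
  | nil => exact ⟨le_refl _, by simp, by intro i h1 h2; simp [pvFirstGap] at h2; omega⟩
  | cons x xs ih =>
    have hx : ∀ y ∈ xs, x ≤ y := fun y hy => List.rel_of_pairwise_cons hL hy
    have htl : xs.Pairwise (· ≤ ·) := hL.of_cons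
    by_cases h1 : x > g
    · rw [pvFirstGap, if_pos (by simpa using h1)]
      refine ⟨le_refl _, ?_, by intro i ha hb; omega⟩
      intro hmem
      rcases List.mem_cons.mp hmem with h | h
      · omega
      · have := hx _ h; omega
    · rw [pvFirstGap, if_neg (by simpa using h1)]
      by_cases h2 : x = g
      · rw [if_pos (by simpa using h2)]
        obtain ⟨i1, i2, i3⟩ := ih htl (g + 1)
        refine ⟨by omega, ?_, ?_⟩
        · intro hmem
          rcases List.mem_cons.mp hmem with h | h
          · omega
          · exact i2 h
        · intro i ha hb
          by_cases hig : i = g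
          · subst hig; subst h2; exact List.mem_cons_self
          · exact List.mem_cons_of_mem _ (i3 i (by omega) hb)
      · rw [if_neg (by simpa using h2)]
        obtain ⟨i1, i2, i3⟩ := ih htl g
        refine ⟨i1, ?_, fun i ha hb => List.mem_cons_of_mem _ (i3 i ha hb)⟩
        intro hmem
        rcases List.mem_cons.mp hmem with h | h
        · omega
        · exact i2 h

lemma pvLoopA_eq (ready : List Int) (tl : Int) :
    pvLoopA ready tl 0 =
      min (pvFirstGap (PySem.List.sorted ready (fun x => x) false) 0) (max 0 tl) := by
  have hC : ∀ x : Int, 0 ≤ x → x < max 0 tl → x < tl := by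
    rcases max_choice (0:Int) tl with h | h <;> omega
  obtain ⟨h1, h2, h3, h4⟩ := pvLoopA_char ready tl 0
  set r := pvLoopA ready tl 0 with hr
  set G := pvFirstGap (PySem.List.sorted ready (fun x => x) false) 0 with hG
  have hpw : (PySem.List.sorted ready (fun x => x) false).Pairwise (· ≤ ·) :=
    PySem.List.sorted_pairwise ready (fun x => x)
  obtain ⟨g1, g2, g3⟩ := pvFirstGap_char _ hpw 0
  have g2' : G ∉ ready := fun h => g2 ((PySem.List.mem_sorted ready (fun x => x) false G).mpr h)
  have g3' : ∀ i : Int, 0 ≤ i → i < G → ready.contains i = true := by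
    intro i ha hb
    simpa using (PySem.List.mem_sorted ready (fun x => x) false i).mp (g3 i ha hb)
  by_contra hne
  rcases lt_trichotomy r (min G (max 0 tl)) with hlt | heq | hgt
  · have hrtl : r < tl := hC r h1 (lt_of_lt_of_le hlt (min_le_right _ _))
    have hcf := h3 hrtl
    have hct := g3' r h1 (lt_of_lt_of_le hlt (min_le_left _ _))
    rw [hcf] at hct; exact Bool.false_ne_true hct
  · exact hne heq
  · rcases min_choice G (max 0 tl) with hmc | hmc
    · rw [hmc] at hgt
      -- G < r, so G is in ready by A's prefix property: contradiction
      have hct := h4 G g1 hgt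
      exact g2' (by simpa using hct)
    · rw [hmc] at hgt; omega

-- ===== VERDICT (by name: the statement is the Claim_ definition above) =====
theorem hint_ready_prefix_end_py_spec : Claim_equal_hint_ready_prefix_end_py := by
  intro rid tl d _
  unfold Spec_hint_ready_prefix_end_py hint_ready_prefix_end_py hint_ready_prefix_end_py_alt
  cases rid with
  | none => rfl
  | some r => exact pvLoopA_eq _ tl
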